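-- pv_equiv track=rewrite | github.com/httpmkl/python-projects | textEditor/main.py | separateWordsProperly
-- ===== SOURCE A (Python) =====
-- import string
--
-- def separateWordsProperly(rawText):
--     words = rawText.split()
--     letters = []
--     alphabet = getAlphabet()
--     filteredText = ''
--
--     for i in words:
--         word = []
--         for j in i:
--             word.append(j)
--         letters.append(word)
--
--     for num in range(len(letters)):
--         i = list(letters[num])
--         for j in range(len(i)):
--             if i[j] not in alphabet:
--                 letters[num].remove(i[j])
--
--     for i in letters:
--         word = ''
--         for j in i:
--             word += j
--         word += ' '
--         filteredText += word
--
--     return filteredText  # Text without punctuation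
--
-- def getAlphabet():
--     lowerLetters = string.ascii_lowercase
--     upperLetters = string.ascii_uppercase
--
--     alphabet = []
--     for i in lowerLetters:
--         alphabet.append(i)
--     for i in upperLetters:
--         alphabet.append(i)
--
--     return alphabet
-- ===== SOURCE B (Python) =====
-- import string
--
-- def separateWordsProperly(rawText):
--     letters = set(string.ascii_letters)
--     out = []
--     in_word = False
--     for c in rawText:
--         if c.isspace():
--             if in_word:
--                 out.append(' ')
--                 in_word = False
--         else:
--             in_word = True
--             if c in letters:
--                 out.append(c)
--     if in_word:
--         out.append(' ')
--     return ''.join(out)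
-- ===== Notes on version B (the rewrite author's own statement) =====
-- stated objective: faster
-- what changed: Replaces A's four passes (split, per-word char copy, in-place remove() of non-letters, per-word rejoin) by one streaming left-to-right scan with an in_word flag that emits kept letters and one space per word.
import Mathlib
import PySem

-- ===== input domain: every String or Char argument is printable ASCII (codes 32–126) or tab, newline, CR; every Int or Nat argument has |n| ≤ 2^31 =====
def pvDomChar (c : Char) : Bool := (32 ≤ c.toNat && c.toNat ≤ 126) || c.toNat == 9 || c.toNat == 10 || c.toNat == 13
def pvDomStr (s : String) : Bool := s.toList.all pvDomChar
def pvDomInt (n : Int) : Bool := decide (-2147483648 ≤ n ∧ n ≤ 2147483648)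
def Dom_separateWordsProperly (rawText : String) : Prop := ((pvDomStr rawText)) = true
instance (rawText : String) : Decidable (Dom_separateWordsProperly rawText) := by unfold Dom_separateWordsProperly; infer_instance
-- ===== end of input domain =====

-- B replaces A's split / per-word char-copy / in-place remove passes by one streaming
-- left-to-right pass with an in_word flag (objective: faster single pass).

-- ===== PORT A =====
-- getAlphabet(): builds the ascii letters list by two append loops
def getAlphabet : List Char :=
  let lowerLetters := "abcdefghijklmnopqrstuvwxyz".toList
  let upperLetters := "ABCDEFGHIJKLMNOPQRSTUVWXYZ".toList
  let alphabet := lowerLetters.foldl (fun a i => a ++ [i]) ([] : List Char)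
  upperLetters.foldl (fun a i => a ++ [i]) alphabet

def separateWordsProperly (rawText : String) : String :=
  let words := PySem.Chars.split₀ rawText.toList
  let alphabet := getAlphabet
  -- first loop: letters = a char-by-char copy of each word
  let letters := words.foldl
    (fun ls i => ls ++ [i.foldl (fun w j => w ++ [j]) ([] : List Char)]) ([] : List (List Char))
  -- second loop: for each index, remove non-alphabet chars from letters[num] in place
  let letters := (List.range letters.length).foldl (fun ls num =>
      let i := ls.getD num []                  -- letters[num]; num < len(letters), in range
      let newi := (List.range i.length).foldl (fun cur j =>
          let cj := i.getD j ' '               -- i[j]; j < len(i), in range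
          if alphabet.contains cj = false then
            (PySem.List.remove? cur cj).getD cur  -- always some: cj still present (Python never raises here)
          else cur) i
      ls.set num newi) letters
  -- third loop: rebuild each word char by char, add a trailing space, concatenate
  let filteredText := letters.foldl (fun acc i =>
      let word := i.foldl (fun w j => w ++ [j]) ([] : List Char)
      acc ++ (word ++ [' '])) ([] : List Char)
  String.ofList filteredText

-- ===== PORT B =====
def pvLetters : List Char := "abcdefghijklmnopqrstuvwxyzABCDEFGHIJKLMNOPQRSTUVWXYZ".toList

-- loop body of B: whitespace closes a word (one space), otherwise we are in a word
-- and keep the char iff it is an ascii letter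
def pvStepB (st : Bool × List Char) (c : Char) : Bool × List Char :=
  if PySem.Chars.isspace c then
    if st.1 then (false, st.2 ++ [' ']) else st
  else
    (true, if pvLetters.contains c then st.2 ++ [c] else st.2)

def separateWordsProperly_alt (rawText : String) : String :=
  let r := rawText.toList.foldl pvStepB (false, [])
  String.ofList (if r.1 then r.2 ++ [' '] else r.2)

-- ===== PRECONDITION & SPEC =====
def Spec_separateWordsProperly (rawText : String) (out : String) : Prop := out = separateWordsProperly_alt rawText
instance (rawText : String) (out : String) : Decidable (Spec_separateWordsProperly rawText out) := by unfold Spec_separateWordsProperly; infer_instance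

-- ===== CLAIM (what is proved, stated in full; the proofs are below) =====
def Claim_equal_separateWordsProperly : Prop := ∀ (rawText : String), Dom_separateWordsProperly rawText → Spec_separateWordsProperly rawText (separateWordsProperly rawText)

-- ===== LEMMAS AND PROOFS =====

-- what both programs emit for one whitespace-separated word
def pvWordOut (w : List Char) : List Char := w.filter (fun c => pvLetters.contains c) ++ [' ']

theorem pv_alpha_eq : getAlphabet = pvLetters := by
  simp only [getAlphabet, pvLetters, PySem.List.foldl_append_singleton_eq_self, List.nil_append]
  decide

-- a fold over range(len) reading xs.getD is a fold over xs
theorem pv_foldl_range_getD {α β : Type} (d : β) (f : α → β → α) :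
    ∀ (xs₂ xs₁ : List β) (init : α),
      (List.range' xs₁.length xs₂.length).foldl (fun cur j => f cur ((xs₁ ++ xs₂).getD j d)) init
        = xs₂.foldl f init := by
  intro xs₂
  induction xs₂ with
  | nil => intro xs₁ init; simp
  | cons x xs ih =>
      intro xs₁ init
      have h1 : (xs₁ ++ x :: xs).getD xs₁.length d = x := by
        simp [List.getD]
      have h2 : xs₁ ++ x :: xs = (xs₁ ++ [x]) ++ xs := by simp
      simp only [List.length_cons, List.range'_succ, List.foldl_cons, h1]
      have h3 := ih (xs₁ ++ [x]) (f init x)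
      rw [← h2] at h3
      simpa using h3

theorem pv_set_append {α : Type} (v b : α) (B : List α) :
    ∀ (A : List α), (A ++ b :: B).set A.length v = A ++ v :: B := by
  intro A; induction A with
  | nil => rfl
  | cons a A ih => simp only [List.cons_append, List.length_cons, List.set_cons_succ, ih]

-- the in-place per-index update loop is a map
theorem pv_set_loop {α : Type} (d : α) (g : α → α) :
    ∀ (B A : List α),
      (List.range' A.length B.length).foldl (fun ls num => ls.set num (g (ls.getD num d))) (A ++ B)
        = A ++ B.map g := by
  intro B
  induction B with
  | nil => intro A; simp
  | cons b B ih =>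
      intro A
      have h1 : (A ++ b :: B).getD A.length d = b := by
        simp [List.getD]
      simp only [List.length_cons, List.range'_succ, List.foldl_cons, h1, pv_set_append]
      have h2 : A ++ g b :: B = (A ++ [g b]) ++ B := by simp
      have h3 := ih (A ++ [g b])
      rw [← h2] at h3
      simpa using h3

-- the remove-loop over a word filters out the non-letters
theorem pv_rem :
    ∀ (s p : List Char),
      s.foldl (fun cur cj =>
          if pvLetters.contains cj = false then (PySem.List.remove? cur cj).getD cur else cur)
        (p.filter (fun c => pvLetters.contains c) ++ s)
        = (p ++ s).filter (fun c => pvLetters.contains c) := by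
  intro s
  induction s with
  | nil => intro p; simp
  | cons c s ih =>
      intro p
      simp only [List.foldl_cons]
      by_cases hc : pvLetters.contains c = true
      · have h1 : List.filter (fun c => pvLetters.contains c) (p ++ [c])
            = List.filter (fun c => pvLetters.contains c) p ++ [c] := by
          have hm : c ∈ pvLetters := by simpa using hc
          rw [List.filter_append, List.filter_singleton]
          simp [hm]
        rw [hc, if_neg (by decide : ¬(true = false))]
        have h3 := ih (p ++ [c])
        rw [h1] at h3
        simpa using h3
      · have hc' : pvLetters.contains c = false := by
          cases h : pvLetters.contains c
          · rfl
          · exact absurd h hc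
        have h1 : List.filter (fun c => pvLetters.contains c) (p ++ [c])
            = List.filter (fun c => pvLetters.contains c) p := by
          have hm : c ∉ pvLetters := by simpa using hc'
          rw [List.filter_append, List.filter_singleton]
          simp [hm]
        rw [hc', if_pos rfl]
        have hmem : c ∈ List.filter (fun c => pvLetters.contains c) p ++ c :: s := by simp
        rw [PySem.List.remove?_eq_some_erase _ _ hmem, Option.getD_some]
        have hnot : c ∉ List.filter (fun c => pvLetters.contains c) p := by
          intro h
          exact absurd (by simpa using List.of_mem_filter h : c ∈ pvLetters) (by simpa using hc')
        rw [List.erase_append_right _ hnot, List.erase_cons_head]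
        have h3 := ih (p ++ [c])
        rw [h1] at h3
        simpa using h3

-- split₀.go's accumulator prepends
theorem pv_go_acc :
    ∀ (cs cur : List Char) (acc : List (List Char)),
      PySem.Chars.split₀.go cs cur acc = acc.reverse ++ PySem.Chars.split₀.go cs cur [] := by
  intro cs
  induction cs with
  | nil =>
      intro cur acc
      simp only [PySem.Chars.split₀.go]
      split_ifs <;> simp
  | cons c cs ih =>
      intro cur acc
      simp only [PySem.Chars.split₀.go]
      split_ifs with h1 h2
      · rw [ih [] acc]
      · rw [ih [] (cur.reverse :: acc), ih [] [cur.reverse]]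
        simp
      · rw [ih (c :: cur) acc]

-- the post-loop step of B
def pvFinishB (r : Bool × List Char) : List Char := if r.1 then r.2 ++ [' '] else r.2

-- B's streaming pass emits exactly the words split₀.go still has to produce
theorem pv_B :
    ∀ (cs cur preB : List Char),
      pvFinishB (cs.foldl pvStepB (!cur.isEmpty, preB ++ cur.reverse.filter (fun c => pvLetters.contains c)))
        = preB ++ ((PySem.Chars.split₀.go cs cur []).map pvWordOut).flatten := by
  intro cs
  induction cs with
  | nil =>
      intro cur preB
      cases cur with
      | nil => simp [PySem.Chars.split₀.go, pvFinishB]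
      | cons a as =>
          simp [PySem.Chars.split₀.go, pvWordOut, pvFinishB]
  | cons c cs ih =>
      intro cur preB
      simp only [List.foldl_cons]
      by_cases hsp : PySem.Chars.isspace c = true
      · cases cur with
        | nil =>
            have hstep : pvStepB (!(List.isEmpty ([] : List Char)),
                preB ++ ([] : List Char).reverse.filter (fun c => pvLetters.contains c)) c
                = (!(List.isEmpty ([] : List Char)),
                   preB ++ ([] : List Char).reverse.filter (fun c => pvLetters.contains c)) := by
              simp [pvStepB, hsp]
            rw [hstep, ih [] preB]
            simp only [PySem.Chars.split₀.go, hsp]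
            simp
        | cons a as =>
            have hstep : pvStepB (!(List.isEmpty (a :: as)),
                preB ++ (a :: as).reverse.filter (fun c => pvLetters.contains c)) c
                = (!(List.isEmpty ([] : List Char)),
                   (preB ++ (a :: as).reverse.filter (fun c => pvLetters.contains c) ++ [' '])
                     ++ ([] : List Char).reverse.filter (fun c => pvLetters.contains c)) := by
              simp [pvStepB, hsp]
            rw [hstep, ih [] _]
            simp only [PySem.Chars.split₀.go, hsp]
            rw [if_pos trivial, if_neg (by simp : ¬((a :: as).isEmpty = true))]
            rw [pv_go_acc cs [] [(a :: as).reverse]]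
            simp [pvWordOut]
      · have hstep : pvStepB (!cur.isEmpty,
            preB ++ cur.reverse.filter (fun c => pvLetters.contains c)) c
            = (!(List.isEmpty (c :: cur)),
               preB ++ (c :: cur).reverse.filter (fun c => pvLetters.contains c)) := by
          by_cases hm : c ∈ pvLetters
          · simp [pvStepB, hsp, List.filter_append, hm]
          · simp [pvStepB, hsp, List.filter_append, hm]
        rw [hstep, ih (c :: cur) preB]
        simp only [PySem.Chars.split₀.go, hsp]
        simp

-- A's three passes compute the same flatMap of per-word outputs
theorem pv_A (rawText : String) :
    separateWordsProperly rawText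
      = String.ofList (((PySem.Chars.split₀ rawText.toList).map pvWordOut).flatten) := by
  unfold separateWordsProperly
  simp only [pv_alpha_eq]
  set cs := rawText.toList with hcs
  -- first loop: copies
  have h1 : (PySem.Chars.split₀ cs).foldl
      (fun ls i => ls ++ [i.foldl (fun w j => w ++ [j]) ([] : List Char)]) ([] : List (List Char))
      = PySem.Chars.split₀ cs := by
    simp only [PySem.List.foldl_append_singleton_eq_self, List.nil_append]
  rw [h1]
  -- second loop: map of the remove-loop
  have h2 : ∀ (L : List (List Char)),
      (List.range L.length).foldl (fun ls num =>
        ls.set num ((List.range (ls.getD num []).length).foldl (fun cur j =>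
          if pvLetters.contains ((ls.getD num []).getD j ' ') = false then
            (PySem.List.remove? cur ((ls.getD num []).getD j ' ')).getD cur
          else cur) (ls.getD num []))) L
      = L.map (fun i => i.filter (fun c => pvLetters.contains c)) := by
    intro L
    simp only [List.range_eq_range']
    have hg : ∀ (i : List Char),
        (List.range' 0 i.length).foldl (fun cur j =>
          if pvLetters.contains (i.getD j ' ') = false then
            (PySem.List.remove? cur (i.getD j ' ')).getD cur
          else cur) i
        = i.filter (fun c => pvLetters.contains c) := by
      intro i
      have h4 := pv_foldl_range_getD (' ') (fun cur cj =>
        if pvLetters.contains cj = false then (PySem.List.remove? cur cj).getD cur else cur) i [] i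
      simp only [List.length_nil, List.nil_append] at h4
      rw [h4]
      have h5 := pv_rem i []
      simpa using h5
    have h6 := pv_set_loop ([] : List Char)
      (fun i => (List.range' 0 i.length).foldl (fun cur j =>
        if pvLetters.contains (i.getD j ' ') = false then
          (PySem.List.remove? cur (i.getD j ' ')).getD cur
        else cur) i) L []
    simp only [List.length_nil, List.nil_append] at h6
    rw [h6]
    exact List.map_congr_left (fun i _ => hg i)
  rw [h2]
  -- third loop: concatenation with trailing spaces
  have h3 : ((PySem.Chars.split₀ cs).map (fun i => i.filter (fun c => pvLetters.contains c))).foldl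
      (fun acc i => acc ++ (i.foldl (fun w j => w ++ [j]) ([] : List Char) ++ [' '])) ([] : List Char)
      = ((PySem.Chars.split₀ cs).map pvWordOut).flatten := by
    simp only [PySem.List.foldl_append_singleton_eq_self, List.nil_append]
    rw [PySem.List.foldl_append_eq_flatMap]
    have h7 : (PySem.Chars.split₀ cs).map pvWordOut
        = (PySem.Chars.split₀ cs).map (fun w => w.filter (fun c => pvLetters.contains c) ++ [' ']) :=
      List.map_congr_left (fun w _ => rfl)
    rw [h7]
    simp [List.flatMap_def, Function.comp_def]
  rw [h3]

-- ===== VERDICT (by name: the statement is the Claim_ definition above) =====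
theorem separateWordsProperly_spec : Claim_equal_separateWordsProperly := by
  intro rawText _
  unfold Spec_separateWordsProperly
  rw [pv_A]
  unfold separateWordsProperly_alt
  have hB := pv_B rawText.toList [] []
  simp only [List.isEmpty_nil, Bool.not_true, List.reverse_nil, List.filter_nil,
    List.append_nil, List.nil_append] at hB
  show String.ofList (((PySem.Chars.split₀ rawText.toList).map pvWordOut).flatten)
      = String.ofList (pvFinishB (rawText.toList.foldl pvStepB (false, [])))
  rw [hB]
  rfl
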